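-- pv_equiv track=rewrite | github.com/mistbit/video-translation-agent | src/video_translation_agent/adapters/normalization.py | _collapse_duplicate_tokens
-- ===== SOURCE A (Python) =====
-- def _collapse_duplicate_tokens(text: str) -> str:
--     if not text:
--         return text
--     tokens = text.split(" ")
--     deduped: list[str] = []
--     for token in tokens:
--         if deduped and deduped[-1].casefold() == token.casefold():
--             continue
--         deduped.append(token)
--     return " ".join(deduped)
-- ===== SOURCE B (Python) =====
-- def _collapse_duplicate_tokens(text: str) -> str:
--     # Stateless pairwise formulation: a token survives iff it differs (casefold)
--     # from its predecessor in the INPUT, since case-equal runs collapse to their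
--     # first element; no output accumulator is consulted.
--     if not text:
--         return text
--     tokens = text.split(" ")
--     kept = [cur for prev, cur in zip(tokens, tokens[1:])
--             if prev.casefold() != cur.casefold()]
--     return " ".join([tokens[0]] + kept)
-- ===== Notes on version B (the rewrite author's own statement) =====
-- stated objective: alternative
-- what changed: Replaces A's stateful loop that compares each token with the last element of the growing output list by a stateless pairwise pass: zip the token list with its own tail and keep a token iff its casefold differs from its input predecessor's, then prepend the first token; correct because case-equal runs collapse to their first element.
import Mathlib
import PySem

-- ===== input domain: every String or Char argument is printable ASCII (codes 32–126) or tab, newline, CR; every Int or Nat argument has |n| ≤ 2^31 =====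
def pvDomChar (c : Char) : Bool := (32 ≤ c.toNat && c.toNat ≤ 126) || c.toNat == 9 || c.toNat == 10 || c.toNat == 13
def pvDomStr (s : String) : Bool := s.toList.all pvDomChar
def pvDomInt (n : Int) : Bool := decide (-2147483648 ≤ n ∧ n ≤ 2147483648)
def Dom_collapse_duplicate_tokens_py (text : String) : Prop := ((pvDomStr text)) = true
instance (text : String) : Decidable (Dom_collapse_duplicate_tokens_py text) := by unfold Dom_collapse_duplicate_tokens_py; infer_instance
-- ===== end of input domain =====

-- B replaces A's stateful loop (compare each token with the last element of the growing output
-- list) by a stateless pairwise pass: zip the tokens with their own tail and keep a token iff its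
-- casefold differs from its INPUT predecessor's, then prepend the first token (alternative).
-- On the ASCII domain str.casefold() coincides with str.lower(), ported as PySem.Str.lower.

-- ===== PORT A =====
-- loop body: 'if deduped and deduped[-1].casefold() == token.casefold(): continue; deduped.append(token)'
def collapseStepA (deduped : List String) (token : String) : List String :=
  match deduped.getLast? with
  | some last => if PySem.Str.lower last = PySem.Str.lower token then deduped else deduped ++ [token]
  | none => deduped ++ [token]

def collapse_duplicate_tokens_py (text : String) : String :=
  if text = "" then text
  else
    -- text.split(" "): sep ≠ "" so split? is always some
    let tokens := (PySem.Str.split? text " ").getD []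
    let deduped := tokens.foldl collapseStepA []
    PySem.Str.join " " deduped

-- ===== PORT B =====
-- 'prev.casefold() != cur.casefold()' filter applied to zip(tokens, tokens[1:])
def pairKeep (pc : String × String) : Option String :=
  if PySem.Str.lower pc.1 = PySem.Str.lower pc.2 then none else some pc.2

def collapse_duplicate_tokens_py_alt (text : String) : String :=
  if text = "" then text
  else
    let tokens := (PySem.Str.split? text " ").getD []
    match tokens with
    | [] => PySem.Str.join " " []   -- unreachable: split of a nonempty string is nonempty
    | t0 :: rest =>
        let kept := ((t0 :: rest).zip rest).filterMap pairKeep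
        PySem.Str.join " " (t0 :: kept)

-- ===== PRECONDITION & SPEC =====
def Spec_collapse_duplicate_tokens_py (text : String) (out : String) : Prop := out = collapse_duplicate_tokens_py_alt text
instance (text : String) (out : String) : Decidable (Spec_collapse_duplicate_tokens_py text out) := by unfold Spec_collapse_duplicate_tokens_py; infer_instance

-- ===== CLAIM (what is proved, stated in full; the proofs are below) =====
def Claim_equal_collapse_duplicate_tokens_py : Prop := ∀ (text : String), Dom_collapse_duplicate_tokens_py text → Spec_collapse_duplicate_tokens_py text (collapse_duplicate_tokens_py text)

-- ===== LEMMAS AND PROOFS =====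

-- abbreviation for B's pairwise-filtered tail relative to a leading token
def tailKeep (p : String) (l : List String) : List String :=
  ((p :: l).zip l).filterMap pairKeep

theorem tailKeep_cons (p t : String) (rest : List String) :
    tailKeep p (t :: rest) =
      (if PySem.Str.lower p = PySem.Str.lower t then [] else [t]) ++ tailKeep t rest := by
  by_cases h : PySem.Str.lower p = PySem.Str.lower t <;>
    simp [tailKeep, pairKeep, h]

-- tailKeep depends on its head token only through its casefold
theorem tailKeep_congr (l : List String) :
    ∀ (p q : String), PySem.Str.lower p = PySem.Str.lower q → tailKeep p l = tailKeep q l := by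
  induction l with
  | nil => intro p q _; rfl
  | cons t rest _ =>
      intro p q h
      rw [tailKeep_cons, tailKeep_cons, h]

-- A's fold with a nonempty accumulator ending in p produces acc ++ p :: B's pairwise tail for p
theorem foldl_collapseStepA_append (l : List String) :
    ∀ (acc : List String) (p : String),
      l.foldl collapseStepA (acc ++ [p]) = acc ++ p :: tailKeep p l := by
  induction l with
  | nil => intro acc p; simp [tailKeep]
  | cons t rest ih =>
      intro acc p
      have hlast : (acc ++ [p]).getLast? = some p := by simp
      rw [List.foldl_cons]
      have hstep : collapseStepA (acc ++ [p]) t =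
          if PySem.Str.lower p = PySem.Str.lower t then acc ++ [p] else acc ++ [p] ++ [t] := by
        unfold collapseStepA; rw [hlast]
      rw [hstep]
      by_cases h : PySem.Str.lower p = PySem.Str.lower t
      · rw [if_pos h, ih acc p, tailKeep_cons, if_pos h,
          tailKeep_congr rest t p (by rw [h])]
        simp
      · rw [if_neg h, tailKeep_cons, if_neg h]
        have := ih (acc ++ [p]) t
        simpa [List.append_assoc] using this

theorem foldl_collapseStepA_nil (t : String) (rest : List String) :
    (t :: rest).foldl collapseStepA [] = t :: tailKeep t rest := by
  have h0 : collapseStepA [] t = [] ++ [t] := rfl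
  simp only [List.foldl_cons, h0]
  simpa using foldl_collapseStepA_append rest [] t

-- ===== VERDICT (by name: the statement is the Claim_ definition above) =====
theorem collapse_duplicate_tokens_py_spec : Claim_equal_collapse_duplicate_tokens_py := by
  intro text _
  unfold Spec_collapse_duplicate_tokens_py collapse_duplicate_tokens_py collapse_duplicate_tokens_py_alt
  by_cases h : text = ""
  · simp [h]
  · simp only [if_neg h]
    cases htok : (PySem.Str.split? text " ").getD [] with
    | nil => rfl
    | cons t0 rest =>
        simp only [foldl_collapseStepA_nil t0 rest, tailKeep]
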